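-- pv_equiv track=rewrite | github.com/sergeyklay/.agents | .agents/skills/make-skill/scripts/validate_skill.py | _fold_block_lines
-- ===== SOURCE A (Python) =====
-- def _fold_block_lines(lines: list[str]) -> str:
--     """Join lines per YAML '>' (folded) semantics.
--
--     A single line break between two non-empty lines becomes a space; each
--     empty line within the block contributes one literal newline to the output.
--     """
--     parts: list[str] = []
--     blank_run = 0
--     has_content = False
--     for line in lines:
--         if line == "":
--             if has_content:
--                 blank_run += 1
--             continue
--         if blank_run:
--             parts.append("\n" * blank_run)
--             blank_run = 0
--         elif has_content:
--             parts.append(" ")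
--         parts.append(line)
--         has_content = True
--     return "".join(parts)
-- ===== SOURCE B (Python) =====
-- def _fold_block_lines(lines: list[str]) -> str:
--     """Join lines per YAML '>' (folded) semantics.
--
--     Pairwise formulation: trim leading/trailing blank lines, then each
--     consecutive pair decides its separator locally (blank -> one newline,
--     after-blank content -> no space, otherwise a space).
--     """
--     start = 0
--     while start < len(lines) and lines[start] == "":
--         start += 1
--     stop = len(lines)
--     while stop > start and lines[stop - 1] == "":
--         stop -= 1
--     t = lines[start:stop]
--     if not t:
--         return ""
--     out = [t[0]]
--     for prev, cur in zip(t, t[1:]):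
--         if cur == "":
--             out.append("\n")
--         elif prev == "":
--             out.append(cur)
--         else:
--             out.append(" " + cur)
--     return "".join(out)
-- ===== Notes on version B (the rewrite author's own statement) =====
-- stated objective: alternative
-- what changed: A's single-pass state machine (deferred blank_run counter plus has_content flag deciding each separator) is replaced by trimming leading/trailing blank lines up front and then a pairwise pass where each consecutive pair of the trimmed list decides its separator locally.
import Mathlib
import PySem

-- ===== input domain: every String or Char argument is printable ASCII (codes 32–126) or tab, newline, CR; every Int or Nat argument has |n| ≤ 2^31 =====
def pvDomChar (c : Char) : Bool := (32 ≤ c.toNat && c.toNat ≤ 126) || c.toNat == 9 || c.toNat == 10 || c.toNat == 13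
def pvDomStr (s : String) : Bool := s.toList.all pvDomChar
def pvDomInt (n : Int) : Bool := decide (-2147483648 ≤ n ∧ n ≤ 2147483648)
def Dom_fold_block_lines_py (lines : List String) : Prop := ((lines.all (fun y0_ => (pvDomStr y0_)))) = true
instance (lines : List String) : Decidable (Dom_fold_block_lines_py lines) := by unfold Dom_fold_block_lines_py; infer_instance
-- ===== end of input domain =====

-- B replaces A's per-line state machine (pending blank_run / has_content flags) by a
-- trim-then-pairwise pass: each consecutive pair of the trimmed list decides its separator
-- locally; objective: alternative decomposition, same cost.

-- ===== PORT A =====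
-- A's loop body (parts, blank_run, has_content); '"\n" * blank_run' is ported by hand
-- as replicate (exact for the nonnegative counter the loop maintains).
def stepA (st : List String × Int × Bool) (line : String) : List String × Int × Bool :=
  let parts := st.1
  let blank_run := st.2.1
  let has_content := st.2.2
  if line == "" then
    (parts, (if has_content then blank_run + 1 else blank_run), has_content)
  else
    let parts2 :=
      if blank_run ≠ 0 then parts ++ [String.ofList (List.replicate blank_run.toNat '\n')]
      else if has_content then parts ++ [" "] else parts
    (parts2 ++ [line], 0, true)

def fold_block_lines_py (lines : List String) : String :=
  PySem.Str.join "" (lines.foldl stepA ([], 0, false)).1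

-- ===== PORT B =====
-- the two while loops trim leading and trailing blank lines (the trailing one scans
-- from the end, ported via reverse/dropWhile/reverse)
def fold_block_lines_py_alt (lines : List String) : String :=
  let t := ((lines.dropWhile (fun l => l == "")).reverse.dropWhile (fun l => l == "")).reverse
  match t with
  | [] => ""
  | h :: rest =>
    PySem.Str.join "" (h :: (t.zip rest).map (fun pc =>
      if pc.2 == "" then "\n"
      else if pc.1 == "" then pc.2
      else " " ++ pc.2))

-- ===== PRECONDITION & SPEC =====
def Spec_fold_block_lines_py (lines : List String) (out : String) : Prop := out = fold_block_lines_py_alt lines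
instance (lines : List String) (out : String) : Decidable (Spec_fold_block_lines_py lines out) := by unfold Spec_fold_block_lines_py; infer_instance

-- ===== CLAIM (what is proved, stated in full; the proofs are below) =====
def Claim_equal_fold_block_lines_py : Prop := ∀ (lines : List String), Dom_fold_block_lines_py lines → Spec_fold_block_lines_py lines (fold_block_lines_py lines)

-- ===== LEMMAS AND PROOFS =====

-- join with empty separator: cons and snoc
theorem join0_cons (a : List Char) (l : List (List Char)) :
    PySem.Chars.join [] (a :: l) = a ++ PySem.Chars.join [] l := by
  cases l with
  | nil => simp [PySem.Chars.join_singleton, PySem.Chars.join_nil]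
  | cons b m => simp [PySem.Chars.join_cons_cons]

theorem join0_append_singleton (l : List (List Char)) (x : List Char) :
    PySem.Chars.join [] (l ++ [x]) = PySem.Chars.join [] l ++ x := by
  induction l with
  | nil => simp [PySem.Chars.join_nil]
  | cons a l ih => simp [join0_cons, ih]

theorem join0_append_pair (l : List (List Char)) (x y : List Char) :
    PySem.Chars.join [] (l ++ [x, y]) = PySem.Chars.join [] l ++ x ++ y := by
  have : l ++ [x, y] = (l ++ [x]) ++ [y] := by simp
  rw [this, join0_append_singleton, join0_append_singleton]

theorem getLast?_cons_ne_nil (a : String) (l : List String) (h : l ≠ []) :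
    (a :: l).getLast? = l.getLast? := by
  cases l with
  | nil => exact absurd rfl h
  | cons b m => exact List.getLast?_cons_cons

-- A's deferred-flush tail semantics
def dfold (r : Int) (u : List String) : List Char :=
  match u with
  | [] => []
  | c :: cs =>
    if c == "" then dfold (r + 1) cs
    else (if r ≠ 0 then List.replicate r.toNat '\n' else [' ']) ++ c.toList ++ dfold 0 cs

-- B's pairwise tail semantics (pb = "previous line was blank")
def pfold (pb : Bool) (u : List String) : List Char :=
  match u with
  | [] => []
  | c :: cs =>
    (if c == "" then ['\n'] else if pb then c.toList else ' ' :: c.toList) ++ pfold (c == "") cs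

theorem A1 (u : List String) (parts : List String) (r : Int) :
    (PySem.Str.join "" (u.foldl stepA (parts, r, true)).1).toList
      = (PySem.Str.join "" parts).toList ++ dfold r u := by
  induction u generalizing parts r with
  | nil => simp [dfold]
  | cons c cs ih =>
    by_cases hc : c = ""
    · subst hc
      simp [List.foldl_cons, stepA, dfold, ih]
    · have hcb : (c == "") = false := by simp [hc]
      simp only [List.foldl_cons, stepA, hcb, Bool.false_eq_true, if_false, if_true]
      by_cases hr : r = 0
      · subst hr
        simp [ih, dfold, hcb, PySem.Str.toList_join]
        rw [join0_append_pair]; simp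
      · simp [ih, dfold, hcb, hr, PySem.Str.toList_join]
        rw [join0_append_pair]; simp

theorem lead_drop (lines : List String) :
    lines.foldl stepA ([], 0, false) = (lines.dropWhile (fun l => l == "")).foldl stepA ([], 0, false) := by
  induction lines with
  | nil => rfl
  | cons c cs ih =>
    by_cases hc : c = ""
    · subst hc; simpa [stepA] using ih
    · simp [hc]

theorem dfold_trailing (v : List String) (r : Int) (k : Nat) :
    dfold r (v ++ List.replicate k "") = dfold r v := by
  induction v generalizing r with
  | nil =>
    simp only [List.nil_append, dfold]
    induction k generalizing r with
    | zero => simp [dfold]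
    | succ k ih => simp [List.replicate_succ, dfold, ih]
  | cons c cs ih =>
    by_cases hc : c = ""
    · subst hc; simp [dfold, ih]
    · simp [dfold, hc, ih]

theorem dfold_eq_pfold (u : List String) (r : Int) (hr : 0 ≤ r)
    (h : u.getLast? ≠ some "") :
    dfold r u = (if u.isEmpty then [] else List.replicate r.toNat '\n') ++ pfold (decide (r ≠ 0)) u := by
  induction u generalizing r with
  | nil => simp [dfold, pfold]
  | cons c cs ih =>
    by_cases hc : c = ""
    · subst hc
      have hcs : cs ≠ [] := by
        intro h0; subst h0; simp at h
      have hlast : cs.getLast? ≠ some "" := by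
        rwa [getLast?_cons_ne_nil _ _ hcs] at h
      have h1 : dfold (r + 1) cs
          = (if cs.isEmpty then [] else List.replicate (r + 1).toNat '\n') ++ pfold (decide (r + 1 ≠ 0)) cs :=
        ih (r + 1) (by omega) hlast
      have hne : r + 1 ≠ 0 := by omega
      have hrep : List.replicate (r + 1).toNat '\n' = List.replicate r.toNat '\n' ++ ['\n'] := by
        have : (r + 1).toNat = r.toNat + 1 := by omega
        rw [this, List.replicate_succ']
      simp [dfold, pfold, h1, hcs, List.isEmpty_iff, hne, hrep]
    · have hcb : (c == "") = false := by simp [hc]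
      have hlast : cs.getLast? ≠ some "" ∨ cs = [] := by
        by_cases hcs : cs = []
        · exact Or.inr hcs
        · exact Or.inl (by rwa [getLast?_cons_ne_nil _ _ hcs] at h)
      have htail : dfold 0 cs = pfold false cs := by
        rcases hlast with hl | hl
        · have := ih 0 le_rfl hl
          simpa using this
        · subst hl; simp [dfold, pfold]
      by_cases hr0 : r = 0
      · subst hr0; simp [dfold, pfold, hcb, htail]
      · simp [dfold, pfold, hcb, hr0, htail]

theorem pairs_eq_pfold (rest : List String) (prev : String) :
    PySem.Chars.join [] (((prev :: rest).zip rest).map (fun pc =>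
        (if pc.2 == "" then "\n"
         else if pc.1 == "" then pc.2
         else " " ++ pc.2 : String).toList))
      = pfold (prev == "") rest := by
  induction rest generalizing prev with
  | nil => simp [pfold, PySem.Chars.join_nil]
  | cons c cs ih =>
    have : ((prev :: c :: cs).zip (c :: cs)) = (prev, c) :: ((c :: cs).zip cs) := by simp
    rw [this]
    simp only [List.map_cons, join0_cons, ih c]
    by_cases hc : c = ""
    · simp [hc, pfold]
    · by_cases hp : prev = ""
      · simp [hc, hp, pfold]
      · simp [hc, hp, pfold, String.toList_append]

theorem dropWhile_head_not (p : String → Bool) (l : List String) (h : String) (u : List String)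
    (hd : l.dropWhile p = h :: u) : p h = false := by
  induction l with
  | nil => simp at hd
  | cons a l ih =>
    by_cases ha : p a = true
    · rw [List.dropWhile_cons_of_pos ha] at hd; exact ih hd
    · rw [List.dropWhile_cons_of_neg ha] at hd
      cases hd; simpa using ha

theorem dropWhile_append_singleton (p : String → Bool) (l : List String) (h : String)
    (hp : p h = false) : (l ++ [h]).dropWhile p = l.dropWhile p ++ [h] := by
  induction l with
  | nil => simp [hp]
  | cons a l ih =>
    by_cases ha : p a = true
    · simp [ha, ih]
    · simp [ha]

-- trailing trim: u splits as (trimmed u) ++ blanks, and trimmed u has no blank last element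
theorem trim_decomp (u : List String) :
    u = (u.reverse.dropWhile (fun l => l == "")).reverse
        ++ List.replicate (u.reverse.takeWhile (fun l => l == "")).length "" := by
  have htk : u.reverse.takeWhile (fun l => l == "")
      = List.replicate (u.reverse.takeWhile (fun l => l == "")).length "" := by
    apply List.eq_replicate_of_mem
    intro b hb
    have := List.mem_takeWhile_imp hb
    simpa using this.symm
  conv_lhs => rw [← List.reverse_reverse u, ← List.takeWhile_append_dropWhile (p := fun l => l == "") (l := u.reverse)]
  rw [List.reverse_append, htk]
  simp

theorem trim_getLast (u : List String) :
    ((u.reverse.dropWhile (fun l => l == "")).reverse).getLast? ≠ some "" := by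
  rw [List.getLast?_reverse]
  intro h
  cases hd : u.reverse.dropWhile (fun l => l == "") with
  | nil => rw [hd] at h; simp at h
  | cons a t =>
    rw [hd] at h
    simp only [List.head?_cons, Option.some.injEq] at h
    have := dropWhile_head_not _ _ _ _ hd
    rw [h] at this
    simp at this

-- ===== VERDICT (by name: the statement is the Claim_ definition above) =====
theorem fold_block_lines_py_spec : Claim_equal_fold_block_lines_py := by
  intro lines _
  unfold Spec_fold_block_lines_py fold_block_lines_py fold_block_lines_py_alt
  apply String.ext
  rw [lead_drop]
  cases h0 : lines.dropWhile (fun l => l == "") with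
  | nil => simp [PySem.Str.toList_join, PySem.Chars.join_nil]
  | cons h u =>
    have hh : (h == "") = false := dropWhile_head_not (fun l => l == "") lines h u h0
    have hstep : stepA (([], 0, false) : List String × Int × Bool) h = ([h], 0, true) := by
      simp [stepA, hh]
    -- trailing decomposition of u
    set v := (u.reverse.dropWhile (fun l => l == "")).reverse with hv
    have hu : u = v ++ List.replicate (u.reverse.takeWhile (fun l => l == "")).length "" := trim_decomp u
    have hvl : v.getLast? ≠ some "" := trim_getLast u
    -- A side
    have hA : (PySem.Str.join "" ((h :: u).foldl stepA ([], 0, false)).1).toList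
        = h.toList ++ pfold false v := by
      rw [List.foldl_cons, hstep, A1]
      have h1 : dfold 0 u = dfold 0 v := by
        conv_lhs => rw [hu]
        exact dfold_trailing v 0 _
      have h2 : dfold 0 v = pfold false v := by
        have := dfold_eq_pfold v 0 le_rfl hvl
        simpa using this
      rw [h1, h2]
      simp [PySem.Str.toList_join, PySem.Chars.join_singleton]
    -- B side: the trimmed list is h :: v
    have htrim : (((h :: u).reverse).dropWhile (fun l => l == "")).reverse = h :: v := by
      rw [List.reverse_cons, dropWhile_append_singleton (fun l => l == "") u.reverse h hh, List.reverse_append]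
      simp [hv]
    rw [hA, htrim]
    rw [PySem.Str.toList_join, show ("" : String).toList = [] from rfl]
    simp only [List.map_cons]
    rw [join0_cons, List.map_map]
    simp only [Function.comp_def]
    rw [pairs_eq_pfold v h, hh]
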